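-- pv_equiv track=rewrite | github.com/Anduqq/padelAI | backend/app/services/analytics.py | _best_bounce_back_run
-- ===== SOURCE A (Python) =====
-- def _best_bounce_back_run(results: list[str]) -> int:
--     best_run = 0
--     for index, result in enumerate(results):
--         if result != "L":
--             continue
--
--         run = 0
--         for next_result in results[index + 1 : index + 4]:
--             if next_result != "W":
--                 break
--             run += 1
--         best_run = max(best_run, run)
--     return best_run
-- ===== SOURCE B (Python) =====
-- def _best_bounce_back_run(results: list[str]) -> int:
--     best = 0
--     run = -1  # -1 means: not currently counting (no loss pending, or streak broken)
--     for result in results: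
--         if result == "L":
--             run = 0
--         elif result == "W":
--             if 0 <= run < 3:
--                 run += 1
--                 if run > best:
--                     best = run
--         else:
--             run = -1
--     return best
-- ===== Notes on version B (the rewrite author's own statement) =====
-- stated objective: simpler
-- what changed: Replaced the nested loop (for each 'L', re-scan a 3-element slice of wins) by a single stateful left-to-right pass maintaining best, a run counter and a not-counting sentinel.
import Mathlib
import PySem

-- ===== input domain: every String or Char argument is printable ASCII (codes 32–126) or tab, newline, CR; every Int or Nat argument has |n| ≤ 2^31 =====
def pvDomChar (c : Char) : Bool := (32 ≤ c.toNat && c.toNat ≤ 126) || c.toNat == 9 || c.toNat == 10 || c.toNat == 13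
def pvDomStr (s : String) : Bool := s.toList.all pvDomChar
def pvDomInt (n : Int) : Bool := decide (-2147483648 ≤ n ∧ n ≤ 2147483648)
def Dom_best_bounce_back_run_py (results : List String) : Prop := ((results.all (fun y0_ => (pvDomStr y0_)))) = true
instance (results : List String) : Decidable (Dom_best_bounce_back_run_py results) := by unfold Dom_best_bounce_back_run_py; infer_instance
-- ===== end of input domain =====

-- B replaces A's nested outer-loss / 3-element-slice scan with one stateful left-to-right pass (simpler decomposition).


-- ===== PORT A =====
-- inner loop: 'for next_result in <slice>: if next_result != "W": break; run += 1'
def pvInnerRunA : List String → Int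
  | [] => 0
  | x :: xs => if x ≠ "W" then 0 else 1 + pvInnerRunA xs

def best_bounce_back_run_py (results : List String) : Int :=
  (PySem.List.enumerate results 0).foldl
    (fun best_run p =>
      if p.2 ≠ "L" then best_run
      else max best_run (pvInnerRunA (PySem.List.slice results (some (p.1 + 1)) (some (p.1 + 4)))))
    0

-- ===== PORT B =====
-- one step of B's single pass: state (best, run); run = -1 means "not counting"
def pvStepB (st : Int × Int) (r : String) : Int × Int :=
  if r = "L" then (st.1, 0)
  else if r = "W" then
    if 0 ≤ st.2 ∧ st.2 < 3 then
      (if st.2 + 1 > st.1 then st.2 + 1 else st.1, st.2 + 1)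
    else st
  else (st.1, -1)

def best_bounce_back_run_py_alt (results : List String) : Int :=
  (results.foldl pvStepB (0, -1)).1

-- ===== PRECONDITION & SPEC =====
def Spec_best_bounce_back_run_py (results : List String) (out : Int) : Prop := out = best_bounce_back_run_py_alt results
instance (results : List String) (out : Int) : Decidable (Spec_best_bounce_back_run_py results out) := by unfold Spec_best_bounce_back_run_py; infer_instance

-- ===== CLAIM (what is proved, stated in full; the proofs are below) =====
def Claim_equal_best_bounce_back_run_py : Prop := ∀ (results : List String), Dom_best_bounce_back_run_py results → Spec_best_bounce_back_run_py results (best_bounce_back_run_py results)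

-- ===== LEMMAS AND PROOFS =====

-- cnt s k = number of leading "W"s of s, capped at k
def pvCnt : List String → Nat → Int
  | _, 0 => 0
  | [], _ + 1 => 0
  | x :: xs, k + 1 => if x = "W" then 1 + pvCnt xs k else 0

-- reference function: A's outer loop, index-free
def pvFm (best : Int) : List String → Int
  | [] => best
  | x :: xs => pvFm (if x = "L" then max best (pvCnt xs 3) else best) xs

theorem pvCnt_nil (k : Nat) : pvCnt [] k = 0 := by cases k <;> rfl

theorem pvCnt_bounds (s : List String) : ∀ k : Nat, 0 ≤ pvCnt s k ∧ pvCnt s k ≤ (k : Int) := by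
  induction s with
  | nil => intro k; simp [pvCnt_nil]
  | cons x xs ih =>
    intro k
    cases k with
    | zero => simp [pvCnt]
    | succ k =>
      have := ih k
      by_cases hx : x = "W" <;> simp [pvCnt, hx] <;> omega

theorem pvInnerRunA_take (s : List String) : ∀ k : Nat, pvInnerRunA (s.take k) = pvCnt s k := by
  induction s with
  | nil => intro k; simp [pvInnerRunA, pvCnt_nil]
  | cons x xs ih =>
    intro k
    cases k with
    | zero => simp [pvInnerRunA, pvCnt]
    | succ k =>
      by_cases hx : x = "W" <;> simp [pvInnerRunA, pvCnt, hx, ih]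

theorem pvFm_nonneg (s : List String) : ∀ b : Int, 0 ≤ b → 0 ≤ pvFm b s := by
  induction s with
  | nil => intro b hb; simpa [pvFm] using hb
  | cons x xs ih =>
    intro b hb
    have hc := pvCnt_bounds xs 3
    simp only [pvFm]
    apply ih
    by_cases hx : x = "L" <;> simp [hx] <;> omega

theorem pvFm_max (s : List String) : ∀ b : Int, 0 ≤ b → pvFm b s = max b (pvFm 0 s) := by
  induction s with
  | nil => intro b hb; simp only [pvFm]; omega
  | cons x xs ih =>
    intro b hb
    have hc := pvCnt_bounds xs 3
    have hn := pvFm_nonneg xs 0 le_rfl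
    have h1 := ih (if x = "L" then max b (pvCnt xs 3) else b) (by by_cases hx : x = "L" <;> simp [hx] <;> try omega)
    have h2 := ih (if x = "L" then max 0 (pvCnt xs 3) else 0) (by by_cases hx : x = "L" <;> simp [hx])
    simp only [pvFm] at *
    rw [h1, h2]
    by_cases hx : x = "L" <;> simp [hx] <;> omega

-- A's fold over enumerate equals pvFm
theorem pvA_aux (l : List String) : ∀ (s : List String) (k : Nat) (b : Int), l.drop k = s →
    (PySem.List.enumerate s (k : Int)).foldl
      (fun best_run p =>
        if p.2 ≠ "L" then best_run
        else max best_run (pvInnerRunA (PySem.List.slice l (some (p.1 + 1)) (some (p.1 + 4)))))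
      b = pvFm b s := by
  intro s
  induction s with
  | nil => intro k b _; simp [PySem.List.enumerate_nil, pvFm]
  | cons x xs ih =>
    intro k b hdrop
    have hxs : l.drop (k + 1) = xs := by
      have h : l.drop (k + 1) = (l.drop k).drop 1 := by rw [List.drop_drop]
      rw [h, hdrop]; rfl
    have hslice : PySem.List.slice l (some ((k : Int) + 1)) (some ((k : Int) + 4)) = xs.take 3 := by
      have h1 : ((k : Int) + 1) = ((k + 1 : Nat) : Int) := by push_cast; ring
      have h4 : ((k : Int) + 4) = ((k + 4 : Nat) : Int) := by push_cast; ring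
      rw [h1, h4, PySem.List.slice_natCast, hxs]
      have h3 : k + 4 - (k + 1) = 3 := by omega
      rw [h3]
    rw [PySem.List.enumerate_cons, List.foldl_cons]
    have hk1 : (k : Int) + 1 = ((k + 1 : Nat) : Int) := by push_cast; ring
    rw [hk1, ih (k + 1) _ hxs]
    by_cases hx : x = "L"
    · simp only [pvFm, hx]
      simp
      rw [hslice, pvInnerRunA_take]
    · simp [pvFm, hx]

theorem pvA_eq_fm (l : List String) : best_bounce_back_run_py l = pvFm 0 l := by
  unfold best_bounce_back_run_py
  have := pvA_aux l l 0 0 (by simp)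
  simpa using this

-- B's fold invariant
theorem pvB_aux (s : List String) : ∀ (b r : Int), 0 ≤ b →
    (r = -1 ∨ r = 0 ∨ r = 1 ∨ r = 2 ∨ r = 3) → (0 ≤ r → r ≤ b) →
    (s.foldl pvStepB (b, r)).1 =
      max (pvFm b s)
        (if r = 0 then pvCnt s 3 else if r = 1 then 1 + pvCnt s 2 else if r = 2 then 2 + pvCnt s 1 else 0) := by
  induction s with
  | nil =>
    intro b r hb hr hrb
    simp only [List.foldl_nil, pvFm, pvCnt_nil]
    rcases hr with h | h | h | h | h <;> subst h <;> simp <;> omega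
  | cons x xs ih =>
    intro b r hb hr hrb
    have hc1 := pvCnt_bounds xs 1
    have hc2 := pvCnt_bounds xs 2
    have hc3 := pvCnt_bounds xs 3
    have hn := pvFm_nonneg xs 0 le_rfl
    rw [List.foldl_cons]
    by_cases hL : x = "L"
    · subst hL
      have hstep : pvStepB (b, r) "L" = (b, 0) := by simp [pvStepB]
      rw [hstep, ih b 0 hb (by omega) (by omega)]
      have hfm1 := pvFm_max xs (max b (pvCnt xs 3)) (by omega)
      have hfm2 := pvFm_max xs b hb
      rcases hr with h | h | h | h | h <;> subst h <;>
        simp [pvFm, pvCnt, hfm1, hfm2] <;> omega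
    · by_cases hW : x = "W"
      · subst hW
        have hfm2 := pvFm_max xs b hb
        rcases hr with h | h | h | h | h <;> subst h
        · have hstep : pvStepB (b, -1) "W" = (b, -1) := by norm_num [pvStepB]; decide
          rw [hstep, ih b (-1) hb (by omega) (by omega)]
          simp [pvFm]
        · have hstep : pvStepB (b, 0) "W" = (max b 1, 1) := by
            simp only [pvStepB]
            split_ifs <;> simp_all <;> try omega
          rw [hstep, ih (max b 1) 1 (by omega) (by omega) (by omega)]
          have hfm1 := pvFm_max xs (max b 1) (by omega)
          simp [pvFm, pvCnt, hfm1, hfm2]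
          omega
        · have hstep : pvStepB (b, 1) "W" = (max b 2, 2) := by
            simp only [pvStepB]
            split_ifs <;> simp_all <;> try omega
          rw [hstep, ih (max b 2) 2 (by omega) (by omega) (by omega)]
          have hfm1 := pvFm_max xs (max b 2) (by omega)
          simp [pvFm, pvCnt, hfm1, hfm2]
          omega
        · have hstep : pvStepB (b, 2) "W" = (max b 3, 3) := by
            simp only [pvStepB]
            split_ifs <;> simp_all <;> try omega
          rw [hstep, ih (max b 3) 3 (by omega) (by omega) (by omega)]
          have hfm1 := pvFm_max xs (max b 3) (by omega)
          simp [pvFm, pvCnt, hfm1, hfm2]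
          omega
        · have hstep : pvStepB (b, 3) "W" = (b, 3) := by norm_num [pvStepB]; decide
          rw [hstep, ih b 3 hb (by omega) (by omega)]
          simp [pvFm]
      · have hstep : pvStepB (b, r) x = (b, -1) := by simp [pvStepB, hL, hW]
        rw [hstep, ih b (-1) hb (by omega) (by omega)]
        have hfm2 := pvFm_max xs b hb
        rcases hr with h | h | h | h | h <;> subst h <;>
          simp [pvFm, pvCnt, hL, hW, hfm2] <;> omega

theorem pvB_eq_fm (l : List String) : best_bounce_back_run_py_alt l = pvFm 0 l := by
  unfold best_bounce_back_run_py_alt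
  have h := pvB_aux l 0 (-1) (by omega) (by omega) (by omega)
  have hn := pvFm_nonneg l 0 le_rfl
  rw [h]
  norm_num
  exact hn

-- ===== VERDICT (by name: the statement is the Claim_ definition above) =====
theorem best_bounce_back_run_py_spec : Claim_equal_best_bounce_back_run_py := by
  intro results _
  unfold Spec_best_bounce_back_run_py
  rw [pvA_eq_fm, pvB_eq_fm]
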